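-- pv_equiv track=rewrite | github.com/aidos-lab/Topo_LLM_public | data/models/trippy_r_checkpoints/multiwoz21/all_checkpoints_code/dst_train.py | get_usr_utt_spans
-- ===== SOURCE A (Python) =====
-- def get_usr_utt_spans(usr_mask):
--     span_indices = [i for i in range(len(usr_mask)) if usr_mask[i]]
--     prev_si = None
--     spans = []
--     for si in span_indices:
--         if prev_si is None or si - prev_si > 1:
--             spans.append([])
--         spans[-1].append(si)
--         prev_si = si
--     spans = [[min(s), max(s)] for s in spans]
--     return spans
-- ===== SOURCE B (Python) =====
-- def get_usr_utt_spans(usr_mask):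
--     spans = []
--     run_start = None
--     for i in range(len(usr_mask)):
--         if usr_mask[i]:
--             if run_start is None:
--                 run_start = i
--         else:
--             if run_start is not None:
--                 spans.append([run_start, i - 1])
--                 run_start = None
--     if run_start is not None:
--         spans.append([run_start, len(usr_mask) - 1])
--     return spans
-- ===== Notes on version B (the rewrite author's own statement) =====
-- stated objective: simpler
-- what changed: Replaced A's build-index-list, group-into-sublists-of-indices, then min/max-reduce pipeline by one edge-detecting scan over positions that keeps only a scalar run_start and emits [start,end] directly (no intermediate index lists, fewer passes).
import Mathlib
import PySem

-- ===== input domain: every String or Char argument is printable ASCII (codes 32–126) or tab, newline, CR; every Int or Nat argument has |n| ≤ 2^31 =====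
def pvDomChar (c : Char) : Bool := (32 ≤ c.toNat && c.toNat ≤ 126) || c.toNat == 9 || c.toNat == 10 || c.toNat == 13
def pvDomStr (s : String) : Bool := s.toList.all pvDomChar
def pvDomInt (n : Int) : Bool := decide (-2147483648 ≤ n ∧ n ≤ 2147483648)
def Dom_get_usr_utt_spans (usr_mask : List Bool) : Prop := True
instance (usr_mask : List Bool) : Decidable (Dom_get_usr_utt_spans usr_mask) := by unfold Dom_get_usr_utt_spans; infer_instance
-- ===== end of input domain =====

-- B replaces A's index-list + grouping + min/max pipeline by a single edge-detecting scan (simpler, same O(n) cost).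

-- ===== PORT A =====
-- one step of A's `for si in span_indices` loop, state = (prev_si, spans)
def pvAStep (st : Option Int × List (List Int)) (si : Int) : Option Int × List (List Int) :=
  let spans :=
    match st.1 with
    | none => st.2 ++ [[]]                               -- prev_si is None → spans.append([])
    | some p => if si - p > 1 then st.2 ++ [[]] else st.2
  (some si, spans.dropLast ++ [spans.getLastD [] ++ [si]])  -- spans[-1].append(si); prev_si = si

-- [[min(s), max(s)] for s in spans] (every s is nonempty, so the getD default is never used)
def pvMM (s : List Int) : List Int :=
  [(PySem.List.min? s (fun x => x)).getD 0, (PySem.List.max? s (fun x => x)).getD 0]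

def get_usr_utt_spans (usr_mask : List Bool) : List (List Int) :=
  let span_indices : List Int :=
    ((List.range usr_mask.length).filter (fun i => usr_mask.getD i false)).map Int.ofNat
  ((span_indices.foldl pvAStep (none, [])).2).map pvMM

-- ===== PORT B =====
-- one step of B's `for i in range(len(usr_mask))` loop, state = (run_start, spans)
def pvBStep (usr_mask : List Bool) (st : Option Int × List (List Int)) (i : Nat) :
    Option Int × List (List Int) :=
  if usr_mask.getD i false then
    match st.1 with
    | none => (some (i : Int), st.2)
    | some _ => st
  else
    match st.1 with
    | none => st
    | some r => (none, st.2 ++ [[r, (i : Int) - 1]])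

def get_usr_utt_spans_alt (usr_mask : List Bool) : List (List Int) :=
  let st := (List.range usr_mask.length).foldl (pvBStep usr_mask) (none, [])
  match st.1 with
  | none => st.2
  | some r => st.2 ++ [[r, (usr_mask.length : Int) - 1]]

-- ===== PRECONDITION & SPEC =====
def Spec_get_usr_utt_spans (usr_mask : List Bool) (out : List (List Int)) : Prop := out = get_usr_utt_spans_alt usr_mask
instance (usr_mask : List Bool) (out : List (List Int)) : Decidable (Spec_get_usr_utt_spans usr_mask out) := by unfold Spec_get_usr_utt_spans; infer_instance

-- ===== CLAIM (what is proved, stated in full; the proofs are below) =====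
def Claim_equal_get_usr_utt_spans : Prop := ∀ (usr_mask : List Bool), Dom_get_usr_utt_spans usr_mask → Spec_get_usr_utt_spans usr_mask (get_usr_utt_spans usr_mask)

-- ===== LEMMAS AND PROOFS =====

-- the two loop results, as functions of the mask
def pvAFold (m : List Bool) : Option Int × List (List Int) :=
  (((List.range m.length).filter (fun i => m.getD i false)).map Int.ofNat).foldl pvAStep (none, [])

def pvBFold (m : List Bool) : Option Int × List (List Int) :=
  (List.range m.length).foldl (pvBStep m) (none, [])

theorem pvGetD_lt (m : List Bool) (b : Bool) (i : Nat) (h : i < m.length) :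
    (m ++ [b]).getD i false = m.getD i false := by
  simp only [List.getD]
  rw [List.getElem?_append_left h]

theorem pvGetD_last (m : List Bool) (b : Bool) : (m ++ [b]).getD m.length false = b := by
  simp [List.getD]

theorem pvFilter_concat (m : List Bool) (b : Bool) :
    (List.range m.length).filter (fun i => (m ++ [b]).getD i false)
      = (List.range m.length).filter (fun i => m.getD i false) := by
  apply List.filter_congr
  intro i hi
  rw [List.mem_range] at hi
  simp only [List.getD]
  rw [List.getElem?_append_left hi]

theorem pvAFold_concat (m : List Bool) (b : Bool) :
    pvAFold (m ++ [b]) = if b then pvAStep (pvAFold m) (m.length : Int) else pvAFold m := by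
  unfold pvAFold
  rw [List.length_append, List.length_cons, List.length_nil, List.range_succ,
    List.filter_append, pvFilter_concat]
  cases b
  · simp
  · simp [List.foldl_append]

theorem pvBFold_concat (m : List Bool) (b : Bool) :
    pvBFold (m ++ [b]) = pvBStep (m ++ [b]) (pvBFold m) m.length := by
  unfold pvBFold
  rw [List.length_append, List.length_cons, List.length_nil, List.range_succ,
    List.foldl_append]
  simp only [List.foldl_cons, List.foldl_nil]
  congr 1
  apply PySem.List.foldl_congr_mem
  intro acc i hi
  rw [List.mem_range] at hi
  simp only [pvBStep]
  rw [pvGetD_lt m b i hi]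

theorem pvMin_concat (g : List Int) (x r : Int) (h : PySem.List.min? g (fun y => y) = some r) :
    PySem.List.min? (g ++ [x]) (fun y => y) = some (min r x) := by
  cases g with
  | nil => simp [PySem.List.min?] at h
  | cons a t =>
    rw [PySem.List.min?_id_cons] at h
    rw [List.cons_append, PySem.List.min?_id_cons, List.foldl_append]
    simp [Option.some_inj.mp h]

theorem pvMax_concat (g : List Int) (x r : Int) (h : PySem.List.max? g (fun y => y) = some r) :
    PySem.List.max? (g ++ [x]) (fun y => y) = some (max r x) := by
  cases g with
  | nil => simp [PySem.List.max?] at h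
  | cons a t =>
    rw [PySem.List.max?_id_cons] at h
    rw [List.cons_append, PySem.List.max?_id_cons, List.foldl_append]
    simp [Option.some_inj.mp h]
def pvInv (m : List Bool) : Prop :=
  (∀ r, (pvBFold m).1 = some r →
      ∃ G g, (pvAFold m).2 = G ++ [g] ∧ G.map pvMM = (pvBFold m).2 ∧
        PySem.List.min? g (fun x => x) = some r ∧
        PySem.List.max? g (fun x => x) = some ((m.length : Int) - 1) ∧
        (pvAFold m).1 = some ((m.length : Int) - 1) ∧ r ≤ (m.length : Int) - 1) ∧
  ((pvBFold m).1 = none →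
      ((pvAFold m).2).map pvMM = (pvBFold m).2 ∧
      ((pvAFold m).1 = none ∨ ∃ p : Int, (pvAFold m).1 = some p ∧ p + 2 ≤ (m.length : Int)))

theorem pvInv_holds (m : List Bool) : pvInv m := by
  induction m using List.reverseRecOn with
  | nil =>
    constructor
    · intro r h; simp [pvBFold] at h
    · intro _; simp [pvAFold, pvBFold]
  | append_singleton m b ih =>
    obtain ⟨ihS, ihN⟩ := ih
    have hA := pvAFold_concat m b
    have hB := pvBFold_concat m b
    rw [pvBStep, pvGetD_last] at hB
    cases b with
    | false =>
      rw [if_neg (by simp)] at hB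
      rw [if_neg (by simp)] at hA
      cases hrb : (pvBFold m).1 with
      | none =>
        rw [hrb] at hB
        constructor
        · intro r h; rw [hB, hrb] at h; exact absurd h (by simp)
        · intro _
          obtain ⟨h1, h2⟩ := ihN hrb
          refine ⟨by rw [hA, hB]; exact h1, ?_⟩
          rcases h2 with h2 | ⟨p, hp, hple⟩
          · exact Or.inl (by rw [hA]; exact h2)
          · exact Or.inr ⟨p, by rw [hA]; exact hp, by simp; omega⟩
      | some r =>
        rw [hrb] at hB
        constructor
        · intro r' h; rw [hB] at h; exact absurd h (by simp)
        · intro _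
          obtain ⟨G, g, hsa, hmap, hmin, hmax, hpa, hrle⟩ := ihS r hrb
          constructor
          · rw [hA, hB, hsa]
            simp only [List.map_append, List.map_cons, List.map_nil, hmap]
            congr 2
            simp [pvMM, hmin, hmax]
          · refine Or.inr ⟨(m.length : Int) - 1, by rw [hA]; exact hpa, by simp; omega⟩
    | true =>
      rw [if_pos rfl] at hB
      rw [if_pos rfl] at hA
      cases hrb : (pvBFold m).1 with
      | none =>
        rw [hrb] at hB
        obtain ⟨hmap, hpa⟩ := ihN hrb
        have hstep : (pvAStep (pvAFold m) (m.length : Int)).2 = (pvAFold m).2 ++ [[(m.length : Int)]] ∧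
            (pvAStep (pvAFold m) (m.length : Int)).1 = some (m.length : Int) := by
          rcases hpa with h | ⟨p, hp, hple⟩
          · rw [pvAStep, h]; simp
          · rw [pvAStep, hp]; simp only
            rw [if_pos (by omega)]
            simp
        constructor
        · intro r' h
          rw [hB] at h
          simp at h
          refine ⟨(pvAFold m).2, [(m.length : Int)], by rw [hA]; exact hstep.1, by rw [hB]; exact hmap, ?_, ?_, ?_, ?_⟩
          · simp [PySem.List.min?_id_cons, ← h]
          · simp [PySem.List.max?_id_cons]
          · rw [hA, hstep.2]; simp
          · simp [← h]
        · intro h; rw [hB] at h; exact absurd h (by simp)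
      | some r =>
        rw [hrb] at hB
        obtain ⟨G, g, hsa, hmap, hmin, hmax, hpa, hrle⟩ := ihS r hrb
        have hg : g ≠ [] := by intro h; rw [h] at hmin; simp [PySem.List.min?] at hmin
        have hstep : (pvAStep (pvAFold m) (m.length : Int)).2 = G ++ [g ++ [(m.length : Int)]] ∧
            (pvAStep (pvAFold m) (m.length : Int)).1 = some (m.length : Int) := by
          rw [pvAStep, hpa]
          simp only
          rw [if_neg (by omega), hsa]
          exact ⟨by simp, trivial⟩
        constructor
        · intro r' h
          rw [hB, hrb] at h
          simp at h
          subst h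
          refine ⟨G, g ++ [(m.length : Int)], by rw [hA]; exact hstep.1, by rw [hB]; exact hmap, ?_, ?_, ?_, ?_⟩
          · rw [pvMin_concat g _ r hmin]
            have : min r (m.length : Int) = r := by omega
            rw [this]
          · rw [pvMax_concat g _ _ hmax]
            have : max ((m.length : Int) - 1) (m.length : Int) = ((m ++ [true]).length : Int) - 1 := by
              simp
            rw [this]
          · rw [hA, hstep.2]; simp
          · simp; omega
        · intro h; rw [hB, hrb] at h; exact absurd h (by simp)

theorem get_usr_utt_spans_spec : Claim_equal_get_usr_utt_spans := by
  intro m _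
  show get_usr_utt_spans m = get_usr_utt_spans_alt m
  have e1 : get_usr_utt_spans m = ((pvAFold m).2).map pvMM := rfl
  have e2 : get_usr_utt_spans_alt m =
      (match (pvBFold m).1 with
       | none => (pvBFold m).2
       | some r => (pvBFold m).2 ++ [[r, (m.length : Int) - 1]]) := rfl
  rw [e1, e2]
  obtain ⟨ihS, ihN⟩ := pvInv_holds m
  cases hrb : (pvBFold m).1 with
  | none => exact (ihN hrb).1
  | some r =>
    obtain ⟨G, g, hsa, hmap, hmin, hmax, _, _⟩ := ihS r hrb
    rw [hsa]
    simp only [List.map_append, List.map_cons, List.map_nil, hmap]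
    congr 2
    simp [pvMM, hmin, hmax]
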